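-- pv_equiv track=rewrite | github.com/tokamak-network/python-snarks | python_snarks/arithmetic/utils.py | naf
-- ===== SOURCE A (Python) =====
-- def naf(n):
--     res = []
--     nn = int(n)
--     while nn:
--         if nn & 1:
--             z = 2 - (nn % 4)
--             res.append(z)
--             nn = nn - z
--         else:
--             res.append(0)
--         nn = nn >> 1
--     return res
-- ===== SOURCE B (Python) =====
-- def naf(n):
--     nn = int(n)
--     h = 3 * nn
--     return [((h >> p) & 1) - ((nn >> p) & 1) for p in range(1, (h ^ nn).bit_length())]
-- ===== Notes on version B (the rewrite author's own statement) =====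
-- stated objective: alternative
-- what changed: Replaces the sequential borrow-and-shift loop (mutating nn, appending digits) by a loop-free closed form: each NAF digit at position p is read off directly as bit p of 3n minus bit p of n, over p in [1, (3n^n).bit_length()).
import Mathlib
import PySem

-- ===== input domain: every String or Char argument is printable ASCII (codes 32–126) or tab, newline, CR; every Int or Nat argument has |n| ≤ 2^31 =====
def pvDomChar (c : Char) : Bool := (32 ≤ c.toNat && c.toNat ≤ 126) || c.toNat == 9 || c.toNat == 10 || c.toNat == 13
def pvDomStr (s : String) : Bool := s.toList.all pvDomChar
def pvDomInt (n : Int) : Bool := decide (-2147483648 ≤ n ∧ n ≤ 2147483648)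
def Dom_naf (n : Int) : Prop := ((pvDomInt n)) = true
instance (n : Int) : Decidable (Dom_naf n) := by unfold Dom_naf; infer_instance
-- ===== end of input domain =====

-- B replaces A's sequential borrow-and-shift loop by a loop-free closed form that reads each
-- NAF digit at position p as bit p of 3n minus bit p of n (objective: alternative, same cost).

-- ===== PORT A =====
-- A's while loop, transliterated with fuel (the fuel only makes the recursion total:
-- |nn| strictly decreases on every iteration, so `n.natAbs + 1` fuel is never exhausted).
def nafLoopA : Nat → Int → List Int
  | 0, _ => []
  | fuel + 1, nn =>
    if nn = 0 then []                                       -- while nn: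
    else if PySem.Int.band nn 1 ≠ 0 then                    -- if nn & 1:
      let z := 2 - PySem.Int.mod nn 4                       --   z = 2 - (nn % 4)
      z :: nafLoopA fuel (PySem.Int.floordiv (nn - z) 2)    --   res.append(z); nn = (nn - z) >> 1
    else
      0 :: nafLoopA fuel (PySem.Int.floordiv nn 2)          -- else: res.append(0); nn = nn >> 1

def naf (n : Int) : List Int := nafLoopA (n.natAbs + 1) n

-- ===== PORT B =====
-- Source B line for line: h = 3*nn; [((h >> p) & 1) - ((nn >> p) & 1) for p in range(1, (h ^ nn).bit_length())]
-- (p ranges over [1, bit_length), so p ≥ 1 and Python's `>> p` is `>>> p.toNat` exactly).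
def naf_alt (n : Int) : List Int :=
  let nn := n
  let h := 3 * nn
  (PySem.List.pyRange 1 (PySem.Int.bitLength (PySem.Int.bxor h nn) : Int) 1).map
    (fun p => PySem.Int.band (h >>> p.toNat) 1 - PySem.Int.band (nn >>> p.toNat) 1)

-- ===== PRECONDITION & SPEC =====
-- (no Pre_: A terminates and returns on every int)
def Spec_naf (n : Int) (out : List Int) : Prop := out = naf_alt n
instance (n : Int) (out : List Int) : Decidable (Spec_naf n out) := by unfold Spec_naf; infer_instance

-- ===== CLAIM (what is proved, stated in full; the proofs are below) =====
def Claim_equal_naf : Prop := ∀ (n : Int), Dom_naf n → Spec_naf n (naf n)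

-- ===== LEMMAS AND PROOFS =====

-- mathematical model of A's loop, over naturals
def nafRec : Nat → List Int
  | 0 => []
  | (m + 1) =>
    let m2 := m + 1
    if _h4 : m2 % 4 = 1 then 1 :: nafRec (m2 / 2)
    else if _h4b : m2 % 4 = 3 then -1 :: nafRec (m2 / 2 + 1)
    else 0 :: nafRec (m2 / 2)
  decreasing_by all_goals omega

-- the digit B reads off at position p, and the digit list B produces, over naturals
def bdig (m p : Nat) : Int :=
  (if (3 * m).testBit p then 1 else 0) - (if m.testBit p then 1 else 0)
def bfun (m : Nat) : List Int :=
  (List.range (PySem.Int.bitLength (((3 * m) ^^^ m : Nat) : Int) - 1)).map (fun i => bdig m (i + 1))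

lemma tb_step (n i : Nat) : n.testBit (i+1) = (n/2).testBit i := by
  simp [Nat.testBit_eq_decide_div_mod_eq, Nat.pow_succ, Nat.div_div_eq_div_mul, Nat.mul_comm]

lemma tb0 (n : Nat) : n.testBit 0 = decide (n % 2 = 1) := by
  simp [Nat.testBit_eq_decide_div_mod_eq]

-- the difference-of-bits invariance: for i ≥ 1 the per-bit difference for (3i-1, i-1) equals that for (3i, i)
lemma claimC : ∀ i, 1 ≤ i → ∀ q,
    ((if (3*i-1).testBit q then (1:Int) else 0) - (if (i-1).testBit q then 1 else 0))
      = ((if (3*i).testBit q then 1 else 0) - (if i.testBit q then 1 else 0)) := by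
  intro i
  induction i using Nat.strong_induction_on with
  | _ i ih =>
    intro hi q
    rcases Nat.even_or_odd i with ⟨a, ha⟩ | ⟨a, ha⟩
    · -- i = 2a, a ≥ 1
      subst ha
      have ha1 : 1 ≤ a := by omega
      cases q with
      | zero =>
        rw [tb0, tb0, tb0, tb0]
        have h1 : (3*(a+a)-1) % 2 = 1 := by omega
        have h2 : ((a+a)-1) % 2 = 1 := by omega
        have h3 : (3*(a+a)) % 2 = 0 := by omega
        have h4 : (a+a) % 2 = 0 := by omega
        simp [h1, h2, h3, h4]
      | succ q =>
        rw [tb_step, tb_step, tb_step, tb_step]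
        have h1 : (3*(a+a)-1)/2 = 3*a-1 := by omega
        have h2 : ((a+a)-1)/2 = a-1 := by omega
        have h3 : (3*(a+a))/2 = 3*a := by omega
        have h4 : (a+a)/2 = a := by omega
        rw [h1, h2, h3, h4]
        exact ih a (by omega) ha1 q
    · -- i = 2a+1
      subst ha
      cases q with
      | zero =>
        rw [tb0, tb0, tb0, tb0]
        have h1 : (3*(2*a+1)-1) % 2 = 0 := by omega
        have h3 : (3*(2*a+1)) % 2 = 1 := by omega
        have h4 : (2*a+1) % 2 = 1 := by omega
        simp [h1, h3, h4]
      | succ q =>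
        rw [tb_step, tb_step, tb_step, tb_step]
        have h1 : (3*(2*a+1)-1)/2 = 3*a+1 := by omega
        have h2 : ((2*a+1)-1)/2 = a := by omega
        have h3 : (3*(2*a+1))/2 = 3*a+1 := by omega
        have h4 : (2*a+1)/2 = a := by omega
        rw [h1, h2, h3, h4]

lemma xor_bit (x y q : Nat) : (x ^^^ y).testBit q = ((x.testBit q).xor (y.testBit q)) := by
  simp [Nat.testBit_xor]


-- parity of c m
lemma c_even (m : Nat) : ((3*m) ^^^ m) % 2 = 0 := by
  rw [Nat.xor_mod_two_eq]
  omega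

lemma c_pos (m : Nat) (hm : 0 < m) : 0 < ((3*m) ^^^ m) := by
  rcases Nat.eq_zero_or_pos ((3*m) ^^^ m) with h | h
  · exact absurd (Nat.xor_eq_zero_iff.mp h) (by omega)
  · exact h

-- bitLength over Nat casts
lemma bl_half (a : Nat) (ha : 0 < a) :
    PySem.Int.bitLength (a : Int) = PySem.Int.bitLength ((a/2 : Nat) : Int) + 1 :=
  PySem.Int.bitLength_natCast ha

lemma bl_succ_even (a : Nat) (ha : 0 < a) (he : a % 2 = 0) :
    PySem.Int.bitLength ((a+1 : Nat) : Int) = PySem.Int.bitLength (a : Int) := by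
  rw [bl_half (a+1) (by omega), bl_half a ha, show (a+1)/2 = a/2 by omega]

-- c recursions
lemma c_double (j : Nat) : ((3*(2*j)) ^^^ (2*j)) = 2 * ((3*j) ^^^ j) := by
  apply Nat.eq_of_testBit_eq
  intro q
  cases q with
  | zero =>
    rw [xor_bit, tb0, tb0, tb0]
    have h1 : (3*(2*j)) % 2 = 0 := by omega
    have h2 : (2*j) % 2 = 0 := by omega
    have h3 : (2 * ((3*j) ^^^ j)) % 2 = 0 := by omega
    simp [h1, h2, h3]
  | succ q =>
    rw [xor_bit, tb_step, tb_step, tb_step]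
    rw [show (3*(2*j))/2 = 3*j by omega, show (2*j)/2 = j by omega,
        show (2 * ((3*j) ^^^ j))/2 = (3*j) ^^^ j by omega, ← xor_bit]

lemma bit_succ_of_even (a q : Nat) (ha : a % 2 = 0) : (a+1).testBit (q+1) = a.testBit (q+1) := by
  rw [tb_step, tb_step, show (a+1)/2 = a/2 by omega]

lemma c_odd1 (j : Nat) (hj : j % 2 = 0) :
    ((3*(2*j+1)) ^^^ (2*j+1)) = 2 * ((3*j) ^^^ j) + 2 := by
  have hc := c_even j
  apply Nat.eq_of_testBit_eq
  intro q
  match q with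
  | 0 =>
    rw [xor_bit, tb0, tb0, tb0]
    have h1 : (3*(2*j+1)) % 2 = 1 := by omega
    have h2 : (2*j+1) % 2 = 1 := by omega
    have h3 : (2 * ((3*j) ^^^ j) + 2) % 2 = 0 := by omega
    simp [h1, h2, h3]
  | 1 =>
    rw [xor_bit, tb_step, tb_step, tb_step, tb0, tb0, tb0]
    rw [show (3*(2*j+1))/2 = 3*j+1 by omega, show (2*j+1)/2 = j by omega,
        show (2 * ((3*j) ^^^ j) + 2)/2 = ((3*j) ^^^ j) + 1 by omega]
    have h1 : (3*j+1) % 2 = 1 := by omega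
    have h3 : (((3*j) ^^^ j) + 1) % 2 = 1 := by omega
    simp [h1, hj, h3]
  | (q+2) =>
    rw [xor_bit, tb_step, tb_step, tb_step, tb_step, tb_step, tb_step]
    rw [show (3*(2*j+1))/2 = 3*j+1 by omega, show (2*j+1)/2 = j by omega,
        show (2 * ((3*j) ^^^ j) + 2)/2 = ((3*j) ^^^ j) + 1 by omega,
        show (3*j+1)/2 = (3*j)/2 by omega, show (((3*j) ^^^ j) + 1)/2 = ((3*j) ^^^ j)/2 by omega]
    rw [← tb_step, ← tb_step, ← tb_step, xor_bit]

-- boolean xor from the integer difference identity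
lemma xor_of_diff (a b c d : Bool)
    (h : ((if a then (1:Int) else 0) - (if b then 1 else 0)) = ((if c then 1 else 0) - (if d then 1 else 0))) :
    a.xor b = c.xor d := by
  cases a <;> cases b <;> cases c <;> cases d <;> simp_all

lemma c_odd3 (j : Nat) (hj : j % 2 = 0) (hj0 : 0 < j) :
    ((3*(2*j-1)) ^^^ (2*j-1)) = 2 * ((3*j) ^^^ j) + 2 := by
  have hc := c_even j
  apply Nat.eq_of_testBit_eq
  intro q
  match q with
  | 0 =>
    rw [xor_bit, tb0, tb0, tb0]
    have h1 : (3*(2*j-1)) % 2 = 1 := by omega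
    have h2 : (2*j-1) % 2 = 1 := by omega
    have h3 : (2 * ((3*j) ^^^ j) + 2) % 2 = 0 := by omega
    simp [h1, h2, h3]
  | 1 =>
    rw [xor_bit, tb_step, tb_step, tb_step, tb0, tb0, tb0]
    rw [show (3*(2*j-1))/2 = 3*j-2 by omega, show (2*j-1)/2 = j-1 by omega,
        show (2 * ((3*j) ^^^ j) + 2)/2 = ((3*j) ^^^ j) + 1 by omega]
    have h1 : (3*j-2) % 2 = 0 := by omega
    have h2 : (j-1) % 2 = 1 := by omega
    have h3 : (((3*j) ^^^ j) + 1) % 2 = 1 := by omega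
    simp [h1, h2, h3]
  | (q+2) =>
    rw [xor_bit, tb_step, tb_step, tb_step, tb_step, tb_step, tb_step]
    rw [show (3*(2*j-1))/2 = 3*j-2 by omega, show (2*j-1)/2 = j-1 by omega,
        show (2 * ((3*j) ^^^ j) + 2)/2 = ((3*j) ^^^ j) + 1 by omega,
        show (((3*j) ^^^ j) + 1)/2 = ((3*j) ^^^ j)/2 by omega]
    have hC := claimC j (by omega) (q+1)
    rw [show 3*j-1 = 3*j-2+1 by omega] at hC
    rw [bit_succ_of_even (3*j-2) q (by omega)] at hC
    rw [← tb_step, ← tb_step, ← tb_step, xor_bit]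
    exact xor_of_diff _ _ _ _ hC

-- heads and tails of the digit lists
lemma head_even (j : Nat) : bdig (2*j) 1 = 0 := by
  unfold bdig
  rw [tb_step, tb_step, show (3*(2*j))/2 = 3*j by omega, show (2*j)/2 = j by omega, tb0, tb0]
  rcases Nat.even_or_odd j with ⟨a, ha⟩ | ⟨a, ha⟩
  · simp [show 3*j % 2 = 0 by omega, show j % 2 = 0 by omega]
  · simp [show 3*j % 2 = 1 by omega, show j % 2 = 1 by omega]

lemma tail_even (j i : Nat) : bdig (2*j) (i+2) = bdig j (i+1) := by
  unfold bdig
  rw [show i+2 = (i+1)+1 by omega, tb_step (3*(2*j)), tb_step (2*j),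
      show (3*(2*j))/2 = 3*j by omega, show (2*j)/2 = j by omega]

lemma head_odd1 (j : Nat) (hj : j % 2 = 0) : bdig (2*j+1) 1 = 1 := by
  unfold bdig
  rw [tb_step, tb_step, show (3*(2*j+1))/2 = 3*j+1 by omega, show (2*j+1)/2 = j by omega, tb0, tb0]
  simp [show (3*j+1) % 2 = 1 by omega, hj]

lemma tail_odd1 (j i : Nat) (hj : j % 2 = 0) : bdig (2*j+1) (i+2) = bdig j (i+1) := by
  unfold bdig
  rw [show i+2 = (i+1)+1 by omega, tb_step (3*(2*j+1)), tb_step (2*j+1),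
      show (3*(2*j+1))/2 = 3*j+1 by omega, show (2*j+1)/2 = j by omega,
      tb_step (3*j+1), tb_step (3*j), show (3*j+1)/2 = (3*j)/2 by omega]

lemma head_odd3 (j : Nat) (hj : j % 2 = 0) (hj0 : 0 < j) : bdig (2*j-1) 1 = -1 := by
  unfold bdig
  rw [tb_step, tb_step, show (3*(2*j-1))/2 = 3*j-2 by omega, show (2*j-1)/2 = j-1 by omega, tb0, tb0]
  simp [show (3*j-2) % 2 = 0 by omega, show (j-1) % 2 = 1 by omega]

lemma tail_odd3 (j i : Nat) (hj : j % 2 = 0) (hj0 : 0 < j) :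
    bdig (2*j-1) (i+2) = bdig j (i+1) := by
  unfold bdig
  rw [show i+2 = (i+1)+1 by omega, tb_step (3*(2*j-1)), tb_step (2*j-1),
      show (3*(2*j-1))/2 = 3*j-2 by omega, show (2*j-1)/2 = j-1 by omega]
  have hC := claimC j (by omega) (i+1)
  rw [show 3*j-1 = (3*j-2)+1 by omega, bit_succ_of_even (3*j-2) i (by omega)] at hC
  exact hC

-- the length of bfun's index range, one halving step
lemma bl_c_even (j : Nat) (hj : 0 < j) :
    PySem.Int.bitLength (((3*(2*j)) ^^^ (2*j) : Nat) : Int)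
      = PySem.Int.bitLength (((3*j) ^^^ j : Nat) : Int) + 1 := by
  rw [c_double, bl_half (2 * ((3*j) ^^^ j)) (by have := c_pos j hj; omega),
      show (2 * ((3*j) ^^^ j))/2 = (3*j) ^^^ j by omega]

lemma bl_two_c_add_two (j : Nat) (hj : 0 < j) :
    PySem.Int.bitLength ((2 * ((3*j) ^^^ j) + 2 : Nat) : Int)
      = PySem.Int.bitLength (((3*j) ^^^ j : Nat) : Int) + 1 := by
  have hc := c_pos j hj
  have he := c_even j
  rw [bl_half (2 * ((3*j) ^^^ j) + 2) (by omega),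
      show (2 * ((3*j) ^^^ j) + 2)/2 = ((3*j) ^^^ j) + 1 by omega,
      bl_succ_even ((3*j) ^^^ j) hc he]

-- main: the loop model equals the closed-form digit list
lemma nafRec_eq_bfun : ∀ m, nafRec m = bfun m := by
  intro m
  induction m using Nat.strong_induction_on with
  | _ m ih =>
    rcases Nat.eq_zero_or_pos m with rfl | hm
    · rw [nafRec]
      unfold bfun
      norm_num [PySem.Int.bitLength_zero]
    · rcases Nat.eq_or_lt_of_le hm with h1 | hm1
      · -- m = 1
        rw [← h1, nafRec]
        norm_num
        rw [nafRec]
        have : bfun 1 = [1] := by decide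
        rw [this]
      · -- m ≥ 2
        obtain ⟨m', rfl⟩ : ∃ m', m = m' + 1 := ⟨m - 1, by omega⟩
        rw [nafRec]
        rcases Nat.even_or_odd (m' + 1) with ⟨j, hj⟩ | ⟨j, hj⟩
        · -- even: m = 2j, j ≥ 1
          have hj' : m' + 1 = 2*j := by omega
          have hj1 : 0 < j := by omega
          rw [dif_neg (by omega), dif_neg (by omega), show (m'+1)/2 = j by omega,
              ih j (by omega)]
          unfold bfun
          rw [hj', bl_c_even j hj1]
          have hK : PySem.Int.bitLength (((3*j) ^^^ j : Nat) : Int) + 1 - 1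
              = (PySem.Int.bitLength (((3*j) ^^^ j : Nat) : Int) - 1) + 1 := by
            rw [bl_half _ (c_pos j hj1)]; omega
          rw [hK, List.range_succ_eq_map, List.map_cons, List.map_map]
          congr 1
          · exact (head_even j).symm
          · apply List.map_congr_left
            intro i _
            simp only [Function.comp_apply]
            exact (tail_even j i).symm
        · rcases Nat.even_or_odd j with ⟨a, hja⟩ | ⟨a, hja⟩
          · -- m = 2j+1, j even : m % 4 = 1
            have hje : j % 2 = 0 := by omega
            have hj1 : 0 < j := by omega
            rw [dif_pos (by omega), show (m'+1)/2 = j by omega, ih j (by omega)]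
            unfold bfun
            rw [show m' + 1 = 2*j+1 by omega, c_odd1 j hje, bl_two_c_add_two j hj1]
            have hK : PySem.Int.bitLength (((3*j) ^^^ j : Nat) : Int) + 1 - 1
                = (PySem.Int.bitLength (((3*j) ^^^ j : Nat) : Int) - 1) + 1 := by
              rw [bl_half _ (c_pos j hj1)]; omega
            rw [hK, List.range_succ_eq_map, List.map_cons, List.map_map]
            congr 1
            · exact (head_odd1 j hje).symm
            · apply List.map_congr_left
              intro i _
              simp only [Function.comp_apply]
              exact (tail_odd1 j i hje).symm
          · -- m odd, m/2 odd : m % 4 = 3, set k = m/2 + 1 (even, positive)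
            have h4 : (m' + 1) % 4 = 3 := by omega
            have hlt : (m'+1)/2 + 1 < m' + 1 := by omega
            rw [dif_neg (by omega), dif_pos h4, ih ((m'+1)/2 + 1) hlt]
            set k := (m'+1)/2 + 1 with hk
            have hke : k % 2 = 0 := by omega
            have hk1 : 0 < k := by omega
            have hmk : m' + 1 = 2*k - 1 := by omega
            unfold bfun
            rw [hmk, c_odd3 k hke hk1, bl_two_c_add_two k hk1]
            have hK : PySem.Int.bitLength (((3*k) ^^^ k : Nat) : Int) + 1 - 1
                = (PySem.Int.bitLength (((3*k) ^^^ k : Nat) : Int) - 1) + 1 := by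
              rw [bl_half _ (c_pos k hk1)]; omega
            rw [hK, List.range_succ_eq_map, List.map_cons, List.map_map]
            congr 1
            · exact (head_odd3 k hke hk1).symm
            · apply List.map_congr_left
              intro i _
              simp only [Function.comp_apply]
              exact (tail_odd3 k i hke hk1).symm

lemma band_cast_one (m : Nat) : PySem.Int.band (m : Int) 1 = ((m % 2 : Nat) : Int) := by
  have : (1:Int) = ((1:Nat):Int) := by norm_num
  rw [this, PySem.Int.band_natCast, Nat.and_one_is_mod]

lemma mod_cast_four (m : Nat) : PySem.Int.mod (m : Int) 4 = ((m % 4 : Nat) : Int) := by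
  have : (4:Int) = ((4:Nat):Int) := by norm_num
  rw [this, PySem.Int.mod_natCast]

lemma fd2 (m : Nat) : PySem.Int.floordiv (m : Int) 2 = ((m / 2 : Nat) : Int) := by
  have : (2:Int) = ((2:Nat):Int) := by norm_num
  rw [this, PySem.Int.floordiv_natCast]

lemma nafLoopA_eq_nafRec : ∀ (fuel m : Nat), m < fuel → nafLoopA fuel (m : Int) = nafRec m := by
  intro fuel
  induction fuel with
  | zero => intro m h; omega
  | succ f ih =>
    intro m hm
    rw [nafLoopA]
    by_cases h0 : m = 0
    · subst h0; simp [nafRec]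
    · have hc : ((m:Int) ≠ 0) := by exact_mod_cast h0
      rw [if_neg hc]
      rw [band_cast_one, mod_cast_four]
      obtain ⟨m', rfl⟩ : ∃ m', m = m' + 1 := ⟨m - 1, by omega⟩
      rw [nafRec]
      by_cases h1 : (m' + 1) % 4 = 1
      · have h2 : (m' + 1) % 2 = 1 := by omega
        rw [dif_pos h1, h2]
        simp only [h1]
        have hz : ((m'+1:Nat):Int) - (2 - ((1:Nat):Int)) = (((m' + 1) - 1 : Nat) : Int) := by push_cast; ring
        rw [if_pos (by norm_num), hz, fd2]
        have : (m' + 1 - 1) / 2 = (m' + 1) / 2 := by omega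
        rw [this, ih _ (by omega)]; norm_num
      · by_cases h3 : (m' + 1) % 4 = 3
        · have h2 : (m' + 1) % 2 = 1 := by omega
          rw [dif_neg h1, dif_pos h3, h2]
          simp only [h3]
          have hz : ((m'+1:Nat):Int) - (2 - ((3:Nat):Int)) = (((m' + 1) + 1 : Nat) : Int) := by push_cast; ring
          rw [if_pos (by norm_num), hz, fd2]
          have : (m' + 1 + 1) / 2 = (m' + 1) / 2 + 1 := by omega
          rw [this, ih _ (by omega)]; norm_num
        · have h2 : (m' + 1) % 2 = 0 := by omega
          rw [dif_neg h1, dif_neg h3, h2]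
          rw [if_neg (by norm_num), fd2, ih _ (by omega)]

lemma shift_band_cast (a s : Nat) :
    PySem.Int.band ((a : Int) >>> (s : Int)) 1 = (if a.testBit s then (1:Int) else 0) := by
  have h1 : ((a : Int) >>> (s : Int)) = ((a >>> s : Nat) : Int) := Int.shiftRight_natCast a s
  have h2 : (1:Int) = ((1:Nat):Int) := by norm_num
  rw [h1, h2, PySem.Int.band_natCast, Nat.and_one_is_mod]
  rw [Nat.testBit_eq_decide_div_mod_eq, Nat.shiftRight_eq_div_pow]
  rcases Nat.mod_two_eq_zero_or_one (a / 2 ^ s) with h | h <;> simp [h]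

lemma naf_alt_eq_bfun (m : Nat) : naf_alt (m : Int) = bfun m := by
  show (PySem.List.pyRange 1 (PySem.Int.bitLength (PySem.Int.bxor (3 * (m:Int)) (m:Int)) : Int) 1).map
      (fun p => PySem.Int.band ((3 * (m:Int)) >>> p.toNat) 1 - PySem.Int.band ((m:Int) >>> p.toNat) 1) = _
  have h3 : (3 : Int) * (m : Int) = ((3 * m : Nat) : Int) := by push_cast; ring
  rw [h3, PySem.Int.bxor_natCast]
  unfold bfun
  rw [PySem.List.pyRange_one]
  rw [List.map_map]
  set L := PySem.Int.bitLength (((3 * m) ^^^ m : Nat) : Int) with hL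
  have hT : ((L : Int) - 1).toNat = L - 1 := by omega
  rw [hT]
  apply List.map_congr_left
  intro k hk
  simp only [Function.comp_apply]
  have hp : ((1 : Int) + (k : Int)).toNat = k + 1 := by omega
  rw [hp, shift_band_cast, shift_band_cast, bdig]

-- ---- the negative branch: A and B both negate the digits of |n| ----

lemma neg_shift_cast (a p : Nat) (ha : 1 ≤ a) :
    ((-(a : Int)) >>> ((p : Nat) : Int)) = -(((a-1) >>> p : Nat) : Int) - 1 := by
  obtain ⟨y, rfl⟩ : ∃ y, a = y + 1 := ⟨a-1, by omega⟩
  have h : (-((y+1:Nat):Int)) = Int.negSucc y := by simp [Int.negSucc_eq]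
  rw [h, Int.shiftRight_negSucc, Int.negSucc_eq]
  simp
  omega

lemma band_negsucc_one (b : Nat) : PySem.Int.band (-(b:Int) - 1) 1 = 1 - ((b &&& 1 : Nat) : Int) := by
  unfold PySem.Int.band
  rw [if_neg (by omega), if_pos (by omega)]
  have h1 : ((1:Int).toNat) = 1 := rfl
  have h2 : ((-(-(b:Int) - 1) - 1).toNat) = b := by omega
  rw [h1, h2, Nat.and_comm 1 b]
  have hle : b &&& 1 ≤ 1 := Nat.and_le_right
  omega

lemma dig_neg (a p : Nat) (ha : 1 ≤ a) :
    PySem.Int.band ((-(a : Int)) >>> ((p : Nat) : Int)) 1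
      = 1 - (if (a-1).testBit p then (1:Int) else 0) := by
  rw [neg_shift_cast a p ha, band_negsucc_one, Nat.and_one_is_mod,
      Nat.testBit_eq_decide_div_mod_eq, Nat.shiftRight_eq_div_pow]
  rcases Nat.mod_two_eq_zero_or_one ((a-1) / 2 ^ p) with h | h <;> simp [h]

-- the xor pattern is unchanged by the two's-complement reflection (from claimC)
lemma c_neg_eq (m : Nat) (hm : 1 ≤ m) : ((3*m-1) ^^^ (m-1)) = (3*m) ^^^ m := by
  apply Nat.eq_of_testBit_eq
  intro q
  rw [xor_bit, xor_bit]
  exact xor_of_diff _ _ _ _ (claimC m hm q)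

lemma bxor_negneg (x y : Nat) (hx : 1 ≤ x) (hy : 1 ≤ y) :
    PySem.Int.bxor (-(x:Int)) (-(y:Int)) = (((x-1) ^^^ (y-1) : Nat) : Int) := by
  unfold PySem.Int.bxor
  rw [if_neg (by omega), if_neg (by omega)]
  congr 2 <;> omega

lemma naf_alt_neg (m : Nat) (hm : 1 ≤ m) :
    naf_alt (-(m : Int)) = (bfun m).map (fun d => -d) := by
  show (PySem.List.pyRange 1 (PySem.Int.bitLength (PySem.Int.bxor (3 * (-(m:Int))) (-(m:Int))) : Int) 1).map
      (fun p => PySem.Int.band ((3 * (-(m:Int))) >>> p.toNat) 1 - PySem.Int.band ((-(m:Int)) >>> p.toNat) 1) = _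
  have h3 : (3 : Int) * (-(m : Int)) = -((3 * m : Nat) : Int) := by push_cast; ring
  rw [h3, bxor_negneg (3*m) m (by omega) hm, c_neg_eq m hm]
  unfold bfun
  rw [PySem.List.pyRange_one, List.map_map, List.map_map]
  set L := PySem.Int.bitLength (((3 * m) ^^^ m : Nat) : Int) with hL
  have hT : ((L : Int) - 1).toNat = L - 1 := by omega
  rw [hT]
  apply List.map_congr_left
  intro k hk
  simp only [Function.comp_apply]
  have hp : ((1 : Int) + (k : Int)).toNat = k + 1 := by omega
  rw [hp, dig_neg (3*m) (k+1) (by omega), dig_neg m (k+1) hm]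
  have hC := claimC m hm (k+1)
  unfold bdig
  rcases hb1 : (3*m-1).testBit (k+1) <;> rcases hb2 : (m-1).testBit (k+1) <;>
    rcases hb3 : (3*m).testBit (k+1) <;> rcases hb4 : m.testBit (k+1) <;>
    simp_all

-- A's loop on a negative argument: the mirrored recursion
lemma nafLoopA_neg : ∀ (fuel m : Nat), m < fuel →
    nafLoopA fuel (-(m : Int)) = (nafRec m).map (fun d => -d) := by
  intro fuel
  induction fuel with
  | zero => intro m h; omega
  | succ f ih =>
    intro m hm
    rw [nafLoopA]
    by_cases h0 : m = 0
    · subst h0; simp [nafRec]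
    · have hc : ((-(m:Int)) ≠ 0) := by
        intro h; rw [neg_eq_zero] at h; exact h0 (by exact_mod_cast h)
      rw [if_neg hc]
      obtain ⟨m', rfl⟩ : ∃ m', m = m' + 1 := ⟨m - 1, by omega⟩
      rw [nafRec]
      have hb : PySem.Int.band (-((m'+1 : Nat):Int)) 1 = PySem.Int.mod (-((m'+1:Nat):Int)) 2 :=
        PySem.Int.band_one _
      by_cases h1 : (m' + 1) % 4 = 1
      · have hm4 : PySem.Int.mod (-((m'+1:Nat):Int)) 4 = 3 := by
          rw [PySem.Int.mod_eq_emod_of_pos (by omega)]; omega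
        have hm2 : PySem.Int.mod (-((m'+1:Nat):Int)) 2 = 1 := by
          rw [PySem.Int.mod_eq_emod_of_pos (by omega)]; omega
        rw [dif_pos h1, hb, hm2, hm4, if_pos (by norm_num)]
        show ((2:Int) - 3) :: nafLoopA f (PySem.Int.floordiv ((-((m'+1:Nat):Int)) - (2 - 3)) 2)
            = List.map (fun d => -d) (1 :: nafRec ((m'+1)/2))
        have hfd : PySem.Int.floordiv ((-((m'+1:Nat):Int)) - (2 - 3)) 2
            = -(((m'+1)/2 : Nat) : Int) := by
          rw [PySem.Int.floordiv_eq_ediv_of_pos (by omega)]; omega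
        rw [hfd, ih _ (by omega)]
        simp
      · by_cases h3 : (m' + 1) % 4 = 3
        · have hm4 : PySem.Int.mod (-((m'+1:Nat):Int)) 4 = 1 := by
            rw [PySem.Int.mod_eq_emod_of_pos (by omega)]; omega
          have hm2 : PySem.Int.mod (-((m'+1:Nat):Int)) 2 = 1 := by
            rw [PySem.Int.mod_eq_emod_of_pos (by omega)]; omega
          rw [dif_neg h1, dif_pos h3, hb, hm2, hm4, if_pos (by norm_num)]
          show ((2:Int) - 1) :: nafLoopA f (PySem.Int.floordiv ((-((m'+1:Nat):Int)) - (2 - 1)) 2)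
              = List.map (fun d => -d) (-1 :: nafRec ((m'+1)/2 + 1))
          have hfd : PySem.Int.floordiv ((-((m'+1:Nat):Int)) - (2 - 1)) 2
              = -(((m'+1)/2 + 1 : Nat) : Int) := by
            rw [PySem.Int.floordiv_eq_ediv_of_pos (by omega)]; omega
          rw [hfd, ih _ (by omega)]
          simp
        · have hm2 : PySem.Int.mod (-((m'+1:Nat):Int)) 2 = 0 := by
            rw [PySem.Int.mod_eq_emod_of_pos (by omega)]; omega
          rw [dif_neg h1, dif_neg h3, hb, hm2, if_neg (by norm_num)]
          have hfd : PySem.Int.floordiv (-((m'+1:Nat):Int)) 2 = -(((m'+1)/2 : Nat) : Int) := by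
            rw [PySem.Int.floordiv_eq_ediv_of_pos (by omega)]; omega
          rw [hfd, ih _ (by omega)]
          simp

-- ===== VERDICT (by name: the statement is the Claim_ definition above) =====
theorem naf_spec : Claim_equal_naf := by
  intro n _
  unfold Spec_naf naf
  by_cases hp : 0 ≤ n
  · have ha : n.natAbs = n.toNat := by omega
    have h : n = ((n.toNat : Nat) : Int) := by omega
    rw [ha, h, naf_alt_eq_bfun, ← nafRec_eq_bfun]
    exact nafLoopA_eq_nafRec (n.toNat + 1) n.toNat (by omega)
  · have hn : n < 0 := by omega
    have h : n = -((n.natAbs : Nat) : Int) := by omega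
    rw [h, naf_alt_neg n.natAbs (by omega), ← nafRec_eq_bfun,
        show ((-((n.natAbs : Nat) : Int)).natAbs) = n.natAbs by omega]
    exact nafLoopA_neg (n.natAbs + 1) n.natAbs (by omega)
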